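-- pv_equiv track=rewrite | github.com/blossom91/myStackVm | assembler.py | label_definition
-- ===== SOURCE A (Python) =====
-- def label_definition(instructions):
--     definition = {}
--     new_instructions = []
--     for i in instructions:
--         if not i.startswith('#'):
--             new_instructions.append(i)
--         else:
--             label_name = i[1:]
--             address = len(new_instructions)
--             definition[label_name] = address
--     return new_instructions, definition
-- ===== SOURCE B (Python) =====
-- def label_definition(instructions):
--     # The address of a label at absolute index j is j minus the number of
--     # labels at indices < j, i.e. j - k where k is the label's rank.
--     labels = [(j, s) for j, s in enumerate(instructions) if s.startswith('#')]
--     definition = {}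
--     for k, (j, s) in enumerate(labels):
--         definition[s[1:]] = j - k
--     new_instructions = [s for s in instructions if not s.startswith('#')]
--     return new_instructions, definition
-- ===== Notes on version B (the rewrite author's own statement) =====
-- stated objective: alternative
-- what changed: Instead of A's fused loop that appends non-labels and reads each label's address from the output list's current length, B first extracts the enumerated label positions and computes each address by pure index arithmetic (absolute index j minus the label's rank k), with the instruction list built by a separate filter.
import Mathlib
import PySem

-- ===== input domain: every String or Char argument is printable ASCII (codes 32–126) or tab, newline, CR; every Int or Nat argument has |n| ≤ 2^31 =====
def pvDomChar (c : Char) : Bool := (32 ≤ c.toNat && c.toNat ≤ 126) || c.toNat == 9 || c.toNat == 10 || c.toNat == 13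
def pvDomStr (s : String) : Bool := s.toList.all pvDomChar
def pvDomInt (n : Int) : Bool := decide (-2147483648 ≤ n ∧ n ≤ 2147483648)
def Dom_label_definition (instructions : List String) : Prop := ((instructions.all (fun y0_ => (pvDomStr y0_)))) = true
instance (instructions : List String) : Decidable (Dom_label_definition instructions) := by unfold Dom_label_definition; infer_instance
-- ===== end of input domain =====

-- B computes label addresses by index arithmetic (absolute index minus label rank) over the
-- enumerated label positions, instead of A's fused loop reading the output list's length; same cost.
-- ===== PORT A =====
def label_definition (instructions : List String) : List String × (List (String × Int)) :=
  let st := instructions.foldl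
    (fun (st : List String × PySem.Dict String Int) i =>
      if ¬ (PySem.Str.startswith i "#" = true) then (st.1 ++ [i], st.2)
      else (st.1, st.2.insert (PySem.Str.slice i (some 1) none) ((st.1.length : Int))))
    ([], PySem.Dict.empty)
  (st.1, st.2.items)

-- ===== PORT B =====
-- B's loop: for k, (j, s) in enumerate(labels): definition[s[1:]] = j - k
def bLabelLoop : List (Int × (Int × String)) → PySem.Dict String Int → PySem.Dict String Int
  | [], d => d
  | (k, (j, s)) :: rest, d =>
    bLabelLoop rest (d.insert (PySem.Str.slice s (some 1) none) (j - k))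

def label_definition_alt (instructions : List String) : List String × (List (String × Int)) :=
  let labels := (PySem.List.enumerate instructions).filter (fun p => PySem.Str.startswith p.2 "#")
  let definition := bLabelLoop (PySem.List.enumerate labels) PySem.Dict.empty
  let new_instructions := instructions.filter (fun s => !(PySem.Str.startswith s "#"))
  (new_instructions, definition.items)

-- ===== PRECONDITION & SPEC =====
def Spec_label_definition (instructions : List String) (out : List String × (List (String × Int))) : Prop := out = label_definition_alt instructions
instance (instructions : List String) (out : List String × (List (String × Int))) : Decidable (Spec_label_definition instructions out) := by unfold Spec_label_definition; infer_instance

-- ===== CLAIM (what is proved, stated in full; the proofs are below) =====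
def Claim_equal_label_definition : Prop := ∀ (instructions : List String), Dom_label_definition instructions → Spec_label_definition instructions (label_definition instructions)

-- ===== LEMMAS AND PROOFS =====
theorem main_loop_eq (rest : List String) :
    ∀ (acc : List String) (d : PySem.Dict String Int) (base k : Int),
    (base : Int) - k = (acc.length : Int) →
    rest.foldl
      (fun (st : List String × PySem.Dict String Int) i =>
        if ¬ (PySem.Str.startswith i "#" = true) then (st.1 ++ [i], st.2)
        else (st.1, st.2.insert (PySem.Str.slice i (some 1) none) ((st.1.length : Int))))
      (acc, d)
    = (acc ++ rest.filter (fun s => !(PySem.Str.startswith s "#")),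
       bLabelLoop (PySem.List.enumerate
         ((PySem.List.enumerate rest base).filter (fun p => PySem.Str.startswith p.2 "#")) k) d) := by
  induction rest with
  | nil => intro acc d base k h; simp [PySem.List.enumerate_nil, bLabelLoop]
  | cons i rest ih =>
    intro acc d base k h
    rw [PySem.List.enumerate_cons, List.foldl_cons]
    by_cases hc : PySem.Chars.startswith i.toList ['#'] = true
    · have hs : PySem.Str.startswith i "#" = true := by
        simpa [PySem.Str.startswith] using hc
      rw [if_neg (not_not_intro hs),
        List.filter_cons_of_neg (by simp [PySem.Str.startswith, hc]),
        List.filter_cons_of_pos (by simp [PySem.Str.startswith, hc]),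
        PySem.List.enumerate_cons]
      simp only [bLabelLoop]
      rw [h, ih acc _ (base + 1) (k + 1) (by omega)]
    · have hs : ¬ PySem.Str.startswith i "#" = true := by
        simpa [PySem.Str.startswith] using hc
      rw [if_pos hs,
        List.filter_cons_of_pos (by simp [PySem.Str.startswith, hc]),
        List.filter_cons_of_neg (by simp [PySem.Str.startswith, hc])]
      dsimp only
      rw [ih (acc ++ [i]) d (base + 1) k (by simp; omega)]
      simp

-- ===== VERDICT (by name: the statement is the Claim_ definition above) =====
theorem label_definition_spec : Claim_equal_label_definition := by
  intro instructions _
  unfold Spec_label_definition label_definition label_definition_alt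
  rw [main_loop_eq instructions [] PySem.Dict.empty 0 0 (by simp)]
  simp
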